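-- pv_equiv track=rewrite | github.com/openhe-hub/grouped-poker-rl | rl/neural/MainPokerModuleFLAT.py | transform
-- ===== SOURCE A (Python) =====
-- def transform(hole_cards, board_cards, idx):
--     cards = hole_cards + board_cards
--     num_dict = {
--         "s": 0,
--         "h": 0,
--         "c": 0,
--         "d": 0,
--     }
--
--     for card in cards:
--         num_dict[card[-1]] += 1
--
--     max_suit = max(num_dict, key=num_dict.get)
--     max_suit_count = num_dict[max_suit]
--
--     MIN_NUM = {2: 2, 5: 3, 6: 4, 7: 5}
--     if max_suit_count < MIN_NUM[idx]:
--         return ''.join([f"{card[:-1]}" for card in cards])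
--     else:
--         result = []
--         for card in cards:
--             suit = card[-1]
--             if suit == max_suit:
--                 result.append(f"{card[:-1]}s")
--             else:
--                 result.append(f"{card[:-1]}o")
--         return ''.join(result)
-- ===== SOURCE B (Python) =====
-- def _best_run(suits, best, best_n):
--     if not suits:
--         return best, best_n
--     run = 1
--     while run < len(suits) and suits[run] == suits[0]:
--         run += 1
--     if best_n < run:
--         return _best_run(suits[run:], suits[0], run)
--     return _best_run(suits[run:], best, best_n)
--
-- def transform(hole_cards, board_cards, idx):
--     cards = hole_cards + board_cards
--     suits = sorted((card[-1] for card in cards), key="shcd".find)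
--     best, best_n = _best_run(suits, "s", 0)
--     threshold = {2: 2, 5: 3, 6: 4, 7: 5}[idx]
--     if best_n < threshold:
--         return ''.join(card[:-1] for card in cards)
--     return ''.join(card[:-1] + ('s' if card[-1] == best else 'o') for card in cards)
-- ===== Notes on version B (the rewrite author's own statement) =====
-- stated objective: alternative
-- what changed: Instead of counting suits in a dict and taking max(dict, key=dict.get), B sorts the suit characters by a fixed 'shcd' priority key and finds the flush suit as the longest run of the sorted list (leftmost run on ties), then emits the marked string from that run's suit and length.
import Mathlib
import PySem

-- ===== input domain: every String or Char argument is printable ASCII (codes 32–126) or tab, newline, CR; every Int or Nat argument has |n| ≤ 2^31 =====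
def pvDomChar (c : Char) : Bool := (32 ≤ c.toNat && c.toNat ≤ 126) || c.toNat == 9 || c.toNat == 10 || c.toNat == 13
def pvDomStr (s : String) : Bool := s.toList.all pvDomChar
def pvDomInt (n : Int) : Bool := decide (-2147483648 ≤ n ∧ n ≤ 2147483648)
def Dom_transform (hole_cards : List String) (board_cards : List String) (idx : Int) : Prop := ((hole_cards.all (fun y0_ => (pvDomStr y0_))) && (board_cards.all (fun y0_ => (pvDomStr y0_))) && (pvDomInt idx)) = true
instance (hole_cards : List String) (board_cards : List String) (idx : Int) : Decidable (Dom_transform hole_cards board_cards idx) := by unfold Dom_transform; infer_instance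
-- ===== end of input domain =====

-- B replaces A's dict suit-counter + max(dict, key=get) argmax by sorting the suit characters
-- under a fixed priority key and scanning the sorted list for its longest run (leftmost on ties);
-- objective: alternative algorithm, same observable result.


-- ===== PORT A =====
-- card[-1] is PySem.Str.pyGet? card (-1); the '.getD ' '' totalizes the IndexError/KeyError
-- cases (empty card, non-suit last char), which Pre_transform excludes (Python A raises there).
def transform (hole_cards : List String) (board_cards : List String) (idx : Int) : String :=
  let cards := hole_cards ++ board_cards
  let numDict : PySem.Dict Char Int :=
    cards.foldl (fun d card => d.modify ((PySem.Str.pyGet? card (-1)).getD ' ') 0 (· + 1))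
      ((((PySem.Dict.empty.insert 's' 0).insert 'h' 0).insert 'c' 0).insert 'd' 0)
  let maxSuit : Char := (PySem.List.max? numDict.keys (fun k => numDict.getD k 0)).getD ' '
  let maxSuitCount : Int := numDict.getD maxSuit 0
  let minNum : PySem.Dict Int Int :=
    (((PySem.Dict.empty.insert 2 2).insert 5 3).insert 6 4).insert 7 5
  if maxSuitCount < minNum.getD idx 0 then
    PySem.Str.join "" (cards.map (fun card => PySem.Str.slice card none (some (-1))))
  else
    let result : List String :=
      cards.foldl (fun r card =>
        let suit := (PySem.Str.pyGet? card (-1)).getD ' '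
        if suit == maxSuit then r ++ [PySem.Str.slice card none (some (-1)) ++ "s"]
        else r ++ [PySem.Str.slice card none (some (-1)) ++ "o"]) []
    PySem.Str.join "" result

-- ===== PORT B =====
-- countRun is _best_run's inner while loop: how far the prefix of the tail still equals suits[0].
def countRun (x : Char) : List Char → Int
  | [] => 0
  | y :: t => if y == x then 1 + countRun x t else 0

lemma countRun_nonneg (x : Char) (l : List Char) : 0 ≤ countRun x l := by
  induction l with
  | nil => simp [countRun]
  | cons y t ih => simp only [countRun]; split <;> omega

-- _best_run; suits[run:] is exact as .drop run.toNat since 1 ≤ run ≤ len(suits).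
def bestRun : List Char → Char → Int → Char × Int
  | [], best, bestN => (best, bestN)
  | x :: rest, best, bestN =>
    let run : Int := 1 + countRun x rest
    if bestN < run then bestRun ((x :: rest).drop run.toNat) x run
    else bestRun ((x :: rest).drop run.toNat) best bestN
termination_by l => l.length
decreasing_by
  all_goals
    have h := countRun_nonneg x rest
    simp [List.length_drop]
    omega

def transform_alt (hole_cards : List String) (board_cards : List String) (idx : Int) : String :=
  let cards := hole_cards ++ board_cards
  let suits : List Char :=
    PySem.List.sorted (cards.map (fun card => (PySem.Str.pyGet? card (-1)).getD ' '))
      (fun ch => PySem.Str.find "shcd" (String.ofList [ch]))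
  let bb := bestRun suits 's' 0
  let threshold : Int :=
    ((((PySem.Dict.empty.insert 2 2).insert 5 3).insert 6 4).insert 7 5 : PySem.Dict Int Int).getD idx 0
  if bb.2 < threshold then
    PySem.Str.join "" (cards.map (fun card => PySem.Str.slice card none (some (-1))))
  else
    PySem.Str.join "" (cards.map (fun card =>
      PySem.Str.slice card none (some (-1)) ++
        (if ((PySem.Str.pyGet? card (-1)).getD ' ') == bb.1 then "s" else "o")))

-- ===== PRECONDITION & SPEC =====
-- Pre_ excludes exactly the inputs where Python A raises: an empty card string or a card whose
-- last character is not one of 's','h','c','d' (IndexError/KeyError in the counting loop), and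
-- idx outside {2,5,6,7} (KeyError on MIN_NUM[idx]).
def Pre_transform (hole_cards : List String) (board_cards : List String) (idx : Int) : Prop :=
  idx ∈ ([2, 5, 6, 7] : List Int) ∧
  ∀ card ∈ hole_cards ++ board_cards,
    PySem.Str.pyGet? card (-1) ∈ ([some 's', some 'h', some 'c', some 'd'] : List (Option Char))
instance (hole_cards : List String) (board_cards : List String) (idx : Int) : Decidable (Pre_transform hole_cards board_cards idx) := by unfold Pre_transform; infer_instance
def pvWitness_transform : List String × List String × Int := (["Ah", "Kh"], ["2s"], 2)

def Spec_transform (hole_cards : List String) (board_cards : List String) (idx : Int) (out : String) : Prop := out = transform_alt hole_cards board_cards idx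
instance (hole_cards : List String) (board_cards : List String) (idx : Int) (out : String) : Decidable (Spec_transform hole_cards board_cards idx out) := by unfold Spec_transform; infer_instance

-- ===== CLAIM (what is proved, stated in full; the proofs are below) =====
def Claim_equal_transform : Prop := ∀ (hole_cards : List String) (board_cards : List String) (idx : Int), Dom_transform hole_cards board_cards idx → Pre_transform hole_cards board_cards idx → Spec_transform hole_cards board_cards idx (transform hole_cards board_cards idx)

-- ===== LEMMAS AND PROOFS =====

-- The canonical suit list: all 's' first, then 'h', then 'c', then 'd'.
def canon (a b c d : Nat) : List Char :=
  List.replicate a 's' ++ (List.replicate b 'h' ++ (List.replicate c 'c' ++ List.replicate d 'd'))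

-- B's sort key and the insertBy 'before' predicate it induces
def pk (ch : Char) : Int := PySem.Str.find "shcd" (String.ofList [ch])
def bf (x y : Char) : Bool := decide (pk x < pk y)

lemma rep_cons (a : Nat) (x : Char) (X : List Char) :
    List.replicate a x ++ (x :: X) = List.replicate (a + 1) x ++ X := by
  simp [List.replicate_succ', List.append_assoc]

lemma insertBy_skip_replicate (x y : Char) (n : Nat) (rest : List Char) (h : bf x y = false) :
    PySem.List.insertBy bf x (List.replicate n y ++ rest)
      = List.replicate n y ++ PySem.List.insertBy bf x rest := by
  induction n with
  | zero => simp
  | succ n ih => simp [List.replicate_succ, PySem.List.insertBy, h, ih]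

lemma insert_canon_s (a b c d : Nat) :
    PySem.List.insertBy bf 's' (canon a b c d) = canon (a + 1) b c d := by
  unfold canon
  rw [insertBy_skip_replicate 's' 's' a _ (by decide), ← rep_cons]
  congr 1
  rcases b with _ | b
  · rcases c with _ | c
    · rcases d with _ | d
      · simp [PySem.List.insertBy]
      · simp [List.replicate_succ, PySem.List.insertBy, show bf 's' 'd' = true from by decide]
    · simp [List.replicate_succ, PySem.List.insertBy, show bf 's' 'c' = true from by decide]
  · simp [List.replicate_succ, PySem.List.insertBy, show bf 's' 'h' = true from by decide]

lemma insert_canon_h (a b c d : Nat) :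
    PySem.List.insertBy bf 'h' (canon a b c d) = canon a (b + 1) c d := by
  unfold canon
  rw [insertBy_skip_replicate 'h' 's' a _ (by decide),
      insertBy_skip_replicate 'h' 'h' b _ (by decide), ← rep_cons]
  congr 2
  rcases c with _ | c
  · rcases d with _ | d
    · simp [PySem.List.insertBy]
    · simp [List.replicate_succ, PySem.List.insertBy, show bf 'h' 'd' = true from by decide]
  · simp [List.replicate_succ, PySem.List.insertBy, show bf 'h' 'c' = true from by decide]

lemma insert_canon_c (a b c d : Nat) :
    PySem.List.insertBy bf 'c' (canon a b c d) = canon a b (c + 1) d := by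
  unfold canon
  rw [insertBy_skip_replicate 'c' 's' a _ (by decide),
      insertBy_skip_replicate 'c' 'h' b _ (by decide),
      insertBy_skip_replicate 'c' 'c' c _ (by decide), ← rep_cons]
  congr 3
  rcases d with _ | d
  · simp [PySem.List.insertBy]
  · simp [List.replicate_succ, PySem.List.insertBy, show bf 'c' 'd' = true from by decide]

lemma insert_canon_d (a b c d : Nat) :
    PySem.List.insertBy bf 'd' (canon a b c d) = canon a b c (d + 1) := by
  unfold canon
  rw [insertBy_skip_replicate 'd' 's' a _ (by decide),
      insertBy_skip_replicate 'd' 'h' b _ (by decide),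
      insertBy_skip_replicate 'd' 'c' c _ (by decide),
      PySem.List.insertBy_of_forall_not_before bf 'd' _
        (by intro y hy; have := List.eq_of_mem_replicate hy; subst this; decide),
      ← List.replicate_succ']

-- B's stable sort by priority key turns a suit list into the canonical block list of its counts.
lemma sorted_canon (L : List Char) (hL : ∀ x ∈ L, x ∈ (['s', 'h', 'c', 'd'] : List Char)) :
    PySem.List.sorted L pk = canon (L.count 's') (L.count 'h') (L.count 'c') (L.count 'd') := by
  rw [PySem.List.sorted_eq_foldl_insertBy]
  have main : ∀ (M : List Char), (∀ x ∈ M, x ∈ (['s', 'h', 'c', 'd'] : List Char)) →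
      ∀ (a b c d : Nat),
      M.foldl (fun acc x => PySem.List.insertBy bf x acc) (canon a b c d)
        = canon (a + M.count 's') (b + M.count 'h') (c + M.count 'c') (d + M.count 'd') := by
    intro M
    induction M with
    | nil => intro _ a b c d; simp
    | cons x t ih =>
      intro hM a b c d
      have hx := hM x (by simp)
      have ht : ∀ y ∈ t, y ∈ (['s', 'h', 'c', 'd'] : List Char) := fun y hy => hM y (by simp [hy])
      simp only [List.foldl_cons]
      simp only [List.mem_cons, List.not_mem_nil, or_false] at hx
      rcases hx with h | h | h | h <;> subst h
      · rw [insert_canon_s, ih ht]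
        simp
        congr 1
        omega
      · rw [insert_canon_h, ih ht]
        simp
        congr 1
        omega
      · rw [insert_canon_c, ih ht]
        simp
        congr 1
        omega
      · rw [insert_canon_d, ih ht]
        simp
        congr 1
        omega
  have hbf : (fun a b => decide (pk a < pk b)) = bf := rfl
  rw [hbf]
  have := main L hL 0 0 0 0
  simp at this
  exact this

lemma countRun_replicate_append (x : Char) (n : Nat) (rest : List Char)
    (h : ∀ y ∈ rest, y ≠ x) :
    countRun x (List.replicate n x ++ rest) = (n : Int) := by
  induction n with
  | zero =>
    rcases rest with _ | ⟨y, t⟩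
    · simp [countRun]
    · have := h y (by simp)
      simp [countRun, this]
  | succ n ih =>
    simp [List.replicate_succ, countRun, ih]
    omega

lemma bestRun_block (x : Char) (n : Nat) (rest : List Char) (best : Char) (bn : Int)
    (hrest : ∀ y ∈ rest, y ≠ x) (hbn : 0 ≤ bn) :
    bestRun (List.replicate n x ++ rest) best bn
      = if bn < (n : Int) then bestRun rest x n else bestRun rest best bn := by
  rcases n with _ | n
  · rw [if_neg (by omega)]; simp
  · rw [List.replicate_succ, List.cons_append]
    simp only [bestRun]
    have hcr : countRun x (List.replicate n x ++ rest) = (n : Int) :=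
      countRun_replicate_append x n rest hrest
    rw [hcr]
    have hdrop : (x :: (List.replicate n x ++ rest)).drop ((1 + (n : Int)).toNat) = rest := by
      have : ((1 + (n : Int)).toNat) = n + 1 := by omega
      rw [this]
      have h2 : (List.replicate n x ++ rest).drop (List.replicate n x).length = rest :=
        List.drop_left
      rw [List.length_replicate] at h2
      exact h2
    rw [hdrop]
    have : (1 + (n : Int)) = ((n + 1 : Nat) : Int) := by push_cast; ring
    rw [this]

-- membership helpers for block lists
lemma mem3 {y : Char} {n1 n2 n3 : Nat} {c1 c2 c3 : Char}
    (h : y ∈ List.replicate n1 c1 ++ (List.replicate n2 c2 ++ List.replicate n3 c3)) :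
    y = c1 ∨ y = c2 ∨ y = c3 := by
  simp only [List.mem_append, List.mem_replicate] at h
  tauto

lemma mem2 {y : Char} {n2 n3 : Nat} {c2 c3 : Char}
    (h : y ∈ List.replicate n2 c2 ++ List.replicate n3 c3) : y = c2 ∨ y = c3 := by
  simp only [List.mem_append, List.mem_replicate] at h
  tauto

-- A's suit counter as a literal dict, and its argmax
def cdict (a b c d : Nat) : PySem.Dict Char Int :=
  PySem.Dict.mk [('s', (a : Int)), ('h', (b : Int)), ('c', (c : Int)), ('d', (d : Int))]

def amax (a b c d : Nat) : Char :=
  (PySem.List.max? ['s', 'h', 'c', 'd'] (fun k => (cdict a b c d).getD k 0)).getD ' '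

lemma cdict_s (a b c d : Nat) : (cdict a b c d).getD 's' 0 = (a : Int) := rfl
lemma cdict_h (a b c d : Nat) : (cdict a b c d).getD 'h' 0 = (b : Int) := rfl
lemma cdict_c (a b c d : Nat) : (cdict a b c d).getD 'c' 0 = (c : Int) := rfl
lemma cdict_d (a b c d : Nat) : (cdict a b c d).getD 'd' 0 = (d : Int) := rfl

lemma amax_eq (a b c d : Nat) :
    amax a b c d =
      (let m2 : Char :=
         if (cdict a b c d).getD 's' 0 < (cdict a b c d).getD 'h' 0 then 'h' else 's'
       let m3 : Char :=
         if (cdict a b c d).getD m2 0 < (cdict a b c d).getD 'c' 0 then 'c' else m2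
       if (cdict a b c d).getD m3 0 < (cdict a b c d).getD 'd' 0 then 'd' else m3) := by
  simp only [amax, PySem.List.max?, List.foldl_cons, List.foldl_nil]
  by_cases h1 : (cdict a b c d).getD 's' 0 < (cdict a b c d).getD 'h' 0
  · simp only [if_pos h1]
    by_cases h2 : (cdict a b c d).getD 'h' 0 < (cdict a b c d).getD 'c' 0
    · simp only [if_pos h2]
      by_cases h3 : (cdict a b c d).getD 'c' 0 < (cdict a b c d).getD 'd' 0 <;>
        simp [h3]
    · simp only [if_neg h2]
      by_cases h3 : (cdict a b c d).getD 'h' 0 < (cdict a b c d).getD 'd' 0 <;>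
        simp [h3]
  · simp only [if_neg h1]
    by_cases h2 : (cdict a b c d).getD 's' 0 < (cdict a b c d).getD 'c' 0
    · simp only [if_pos h2]
      by_cases h3 : (cdict a b c d).getD 'c' 0 < (cdict a b c d).getD 'd' 0 <;>
        simp [h3]
    · simp only [if_neg h2]
      by_cases h3 : (cdict a b c d).getD 's' 0 < (cdict a b c d).getD 'd' 0 <;>
        simp [h3]

lemma bestRun_rep (x : Char) (n : Nat) (best : Char) (bn : Int) (hbn : 0 ≤ bn) :
    bestRun (List.replicate n x) best bn
      = if bn < (n : Int) then (x, (n : Int)) else (best, bn) := by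
  rw [← List.append_nil (List.replicate n x), bestRun_block x n [] best bn (by simp) hbn]
  split_ifs <;> simp [bestRun]

-- B's longest-run scan over the canonical block list returns exactly A's argmax suit and count.
lemma bestRun_canon (a b c d : Nat) :
    bestRun (canon a b c d) 's' 0 = (amax a b c d, (cdict a b c d).getD (amax a b c d) 0) := by
  have e0 : bestRun (canon a b c d) 's' 0
      = bestRun (List.replicate b 'h' ++ (List.replicate c 'c' ++ List.replicate d 'd')) 's' a := by
    unfold canon
    rw [bestRun_block 's' a _ 's' 0
      (fun y hy => by rcases mem3 hy with h | h | h <;> (subst h; decide)) (le_refl 0)]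
    split_ifs with h
    · rfl
    · have ha : a = 0 := by omega
      subst ha; rfl
  rw [e0]
  by_cases h1 : (a : Int) < (b : Int)
  · rw [bestRun_block 'h' b _ 's' a
      (fun y hy => by rcases mem2 hy with h | h <;> (subst h; decide)) (Int.natCast_nonneg a),
      if_pos h1]
    by_cases h2 : (b : Int) < (c : Int)
    · rw [bestRun_block 'c' c _ 'h' b
        (fun y hy => by have := List.eq_of_mem_replicate hy; subst this; decide)
        (Int.natCast_nonneg b), if_pos h2]
      by_cases h3 : (c : Int) < (d : Int)
      · rw [bestRun_rep 'd' d 'c' c (Int.natCast_nonneg c), if_pos h3]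
        simp [amax_eq, cdict_s, cdict_h, cdict_c, cdict_d, h1, h2, h3]
      · rw [bestRun_rep 'd' d 'c' c (Int.natCast_nonneg c), if_neg h3]
        simp [amax_eq, cdict_s, cdict_h, cdict_c, cdict_d, h1, h2, h3]
    · rw [bestRun_block 'c' c _ 'h' b
        (fun y hy => by have := List.eq_of_mem_replicate hy; subst this; decide)
        (Int.natCast_nonneg b), if_neg h2]
      by_cases h3 : (b : Int) < (d : Int)
      · rw [bestRun_rep 'd' d 'h' b (Int.natCast_nonneg b), if_pos h3]
        simp [amax_eq, cdict_s, cdict_h, cdict_c, cdict_d, h1, h2, h3]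
      · rw [bestRun_rep 'd' d 'h' b (Int.natCast_nonneg b), if_neg h3]
        simp [amax_eq, cdict_s, cdict_h, cdict_c, cdict_d, h1, h2, h3]
  · rw [bestRun_block 'h' b _ 's' a
      (fun y hy => by rcases mem2 hy with h | h <;> (subst h; decide)) (Int.natCast_nonneg a),
      if_neg h1]
    by_cases h2 : (a : Int) < (c : Int)
    · rw [bestRun_block 'c' c _ 's' a
        (fun y hy => by have := List.eq_of_mem_replicate hy; subst this; decide)
        (Int.natCast_nonneg a), if_pos h2]
      by_cases h3 : (c : Int) < (d : Int)
      · rw [bestRun_rep 'd' d 'c' c (Int.natCast_nonneg c), if_pos h3]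
        simp [amax_eq, cdict_s, cdict_h, cdict_c, cdict_d, h1, h2, h3]
      · rw [bestRun_rep 'd' d 'c' c (Int.natCast_nonneg c), if_neg h3]
        simp [amax_eq, cdict_s, cdict_h, cdict_c, cdict_d, h1, h2, h3]
    · rw [bestRun_block 'c' c _ 's' a
        (fun y hy => by have := List.eq_of_mem_replicate hy; subst this; decide)
        (Int.natCast_nonneg a), if_neg h2]
      by_cases h3 : (a : Int) < (d : Int)
      · rw [bestRun_rep 'd' d 's' a (Int.natCast_nonneg a), if_pos h3]
        simp [amax_eq, cdict_s, cdict_h, cdict_c, cdict_d, h1, h2, h3]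
      · rw [bestRun_rep 'd' d 's' a (Int.natCast_nonneg a), if_neg h3]
        simp [amax_eq, cdict_s, cdict_h, cdict_c, cdict_d, h1, h2, h3]

-- A's counting loop over a suit list turns the literal start dict into the literal count dict.
lemma counts_lit (L : List Char) (hL : ∀ x ∈ L, x ∈ (['s', 'h', 'c', 'd'] : List Char))
    (a b c d : Int) :
    L.foldl (fun dd x => dd.modify x 0 (· + 1))
        (PySem.Dict.mk [('s', a), ('h', b), ('c', c), ('d', d)])
      = PySem.Dict.mk [('s', a + L.count 's'), ('h', b + L.count 'h'),
          ('c', c + L.count 'c'), ('d', d + L.count 'd')] := by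
  induction L generalizing a b c d with
  | nil => simp
  | cons x t ih =>
    have hx := hL x (by simp)
    have ht : ∀ y ∈ t, y ∈ (['s', 'h', 'c', 'd'] : List Char) :=
      fun y hy => hL y (List.mem_cons_of_mem _ hy)
    simp only [List.foldl_cons]
    simp only [List.mem_cons, List.not_mem_nil, or_false] at hx
    rcases hx with h | h | h | h <;> subst h
    · have hm : (PySem.Dict.mk [('s', a), ('h', b), ('c', c), ('d', d)]).modify 's' 0 (· + 1)
          = PySem.Dict.mk [('s', a + 1), ('h', b), ('c', c), ('d', d)] := rfl
      rw [hm, ih ht]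
      simp
      ring_nf
    · have hm : (PySem.Dict.mk [('s', a), ('h', b), ('c', c), ('d', d)]).modify 'h' 0 (· + 1)
          = PySem.Dict.mk [('s', a), ('h', b + 1), ('c', c), ('d', d)] := rfl
      rw [hm, ih ht]
      simp
      ring_nf
    · have hm : (PySem.Dict.mk [('s', a), ('h', b), ('c', c), ('d', d)]).modify 'c' 0 (· + 1)
          = PySem.Dict.mk [('s', a), ('h', b), ('c', c + 1), ('d', d)] := rfl
      rw [hm, ih ht]
      simp
      ring_nf
    · have hm : (PySem.Dict.mk [('s', a), ('h', b), ('c', c), ('d', d)]).modify 'd' 0 (· + 1)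
          = PySem.Dict.mk [('s', a), ('h', b), ('c', c), ('d', d + 1)] := rfl
      rw [hm, ih ht]
      simp
      ring_nf

-- 'if p then r ++ [e1] else r ++ [e2]' is appending one conditional element.
lemma fold_if_push {α β : Type} (p : α → Bool) (f g : α → β) (l : List α) (acc : List β) :
    l.foldl (fun r x => if p x then r ++ [f x] else r ++ [g x]) acc
      = l.foldl (fun r x => r ++ [if p x then f x else g x]) acc := by
  induction l generalizing acc with
  | nil => rfl
  | cons a t ih => simp only [List.foldl_cons]; split <;> exact ih _

-- ===== VERDICT (by name: the statement is the Claim_ definition above) =====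
theorem transform_spec : Claim_equal_transform := by
  intro hc bc idx _ hpre
  obtain ⟨hidx, hcards⟩ := hpre
  unfold Spec_transform transform transform_alt
  dsimp only []
  -- the common suit list
  have hL : ∀ x ∈ (hc ++ bc).map (fun card => (PySem.Str.pyGet? card (-1)).getD ' '),
      x ∈ (['s', 'h', 'c', 'd'] : List Char) := by
    intro x hx
    obtain ⟨card, hcard, rfl⟩ := List.mem_map.1 hx
    have h := hcards card hcard
    simp only [List.mem_cons, List.not_mem_nil, or_false] at h
    rcases h with h | h | h | h <;> rw [h] <;> simp
  -- A's counting loop = literal count dict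
  have hfold : (hc ++ bc).foldl
        (fun d card => d.modify ((PySem.Str.pyGet? card (-1)).getD ' ') 0 (· + 1))
        ((((PySem.Dict.empty.insert 's' 0).insert 'h' 0).insert 'c' 0).insert 'd' 0)
      = cdict (((hc ++ bc).map (fun card => (PySem.Str.pyGet? card (-1)).getD ' ')).count 's')
          (((hc ++ bc).map (fun card => (PySem.Str.pyGet? card (-1)).getD ' ')).count 'h')
          (((hc ++ bc).map (fun card => (PySem.Str.pyGet? card (-1)).getD ' ')).count 'c')
          (((hc ++ bc).map (fun card => (PySem.Str.pyGet? card (-1)).getD ' ')).count 'd') := by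
    have hstep := List.foldl_map (f := fun card => (PySem.Str.pyGet? card (-1)).getD ' ')
      (g := fun (dd : PySem.Dict Char Int) x => dd.modify x 0 (· + 1)) (l := hc ++ bc)
      (init := PySem.Dict.mk [('s', 0), ('h', 0), ('c', 0), ('d', 0)])
    have hinit : (((PySem.Dict.empty.insert 's' (0 : Int)).insert 'h' 0).insert 'c' 0).insert 'd' 0
        = PySem.Dict.mk [('s', 0), ('h', 0), ('c', 0), ('d', 0)] := rfl
    rw [hinit, ← hstep, counts_lit _ hL 0 0 0 0]
    simp [cdict]
  rw [hfold]
  set n1 := ((hc ++ bc).map (fun card => (PySem.Str.pyGet? card (-1)).getD ' ')).count 's' with hn1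
  set n2 := ((hc ++ bc).map (fun card => (PySem.Str.pyGet? card (-1)).getD ' ')).count 'h' with hn2
  set n3 := ((hc ++ bc).map (fun card => (PySem.Str.pyGet? card (-1)).getD ' ')).count 'c' with hn3
  set n4 := ((hc ++ bc).map (fun card => (PySem.Str.pyGet? card (-1)).getD ' ')).count 'd' with hn4
  rw [show (cdict n1 n2 n3 n4).keys = ['s', 'h', 'c', 'd'] from rfl]
  rw [show (PySem.List.max? ['s', 'h', 'c', 'd'] (fun k => (cdict n1 n2 n3 n4).getD k 0)).getD ' '
      = amax n1 n2 n3 n4 from rfl]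
  -- B's sort + run scan = A's argmax and its count
  have hkey : (fun ch => PySem.Str.find "shcd" (String.ofList [ch])) = pk := rfl
  rw [hkey, sorted_canon _ hL, ← hn1, ← hn2, ← hn3, ← hn4, bestRun_canon]
  -- both sides now branch on the same condition with the same threshold
  by_cases hth : (cdict n1 n2 n3 n4).getD (amax n1 n2 n3 n4) 0
      < ((((PySem.Dict.empty.insert 2 2).insert 5 3).insert 6 4).insert 7 5 :
          PySem.Dict Int Int).getD idx 0
  · rw [if_pos hth, if_pos hth]
  · rw [if_neg hth, if_neg hth]
    rw [fold_if_push, PySem.List.foldl_append_singleton_eq_map, List.nil_append]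
    congr 1
    apply List.map_congr_left
    intro card _
    cases h : ((PySem.Str.pyGet? card (-1)).getD ' ' == amax n1 n2 n3 n4) <;>
      simp [h]
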